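-- pv_equiv track=rewrite | github.com/MetOffice/SimSys_Scripts | lfric_macros/apply_macros.py | split_macros
-- ===== SOURCE A (Python) =====
-- def split_macros(parsed_versions):
--     """
--     Read through a versions.py file and split macros into individual strings
--     Inputs:
--         - parsed_versions, a list of lines from a versions.py file with blank
--           lines removed
--     Returns:
--         - a list of strings of individual macros
--     """
--
--     # construct a string for each macro and save in macros list
--     macros = []
--     macro = ""
--     in_macro = False
--     for line in parsed_versions:
--         if line.startswith("class vn") and not line.startswith("class vnXX_txxx"):
--             # If the macro string is set, then append to the list. If it's
--             # empty then this is the first macro we're looking at, so nothing to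
--             # append
--             if macro:
--                 macros.append(macro)
--             in_macro = True
--             macro = ""
--         if in_macro:
--             macro += line
--     # Make sure to record final macro
--     if macro:
--         macros.append(macro)
--
--     return macros
-- ===== SOURCE B (Python) =====
-- def split_macros(parsed_versions):
--     """Boundary-index decomposition: find the macro-header lines, then join slices."""
--     boundaries = [i for i, line in enumerate(parsed_versions)
--                   if line.startswith("class vn")
--                   and not line.startswith("class vnXX_txxx")]
--     ends = boundaries[1:] + [len(parsed_versions)]
--     return ["".join(parsed_versions[s:e]) for s, e in zip(boundaries, ends)]
-- ===== Notes on version B (the rewrite author's own statement) =====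
-- stated objective: simpler
-- what changed: Replaces the stateful accumulator loop (in_macro flag, growing macro string, final flush) with a two-step decomposition: collect the boundary-line indices, then join each slice between consecutive boundaries.
import Mathlib
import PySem

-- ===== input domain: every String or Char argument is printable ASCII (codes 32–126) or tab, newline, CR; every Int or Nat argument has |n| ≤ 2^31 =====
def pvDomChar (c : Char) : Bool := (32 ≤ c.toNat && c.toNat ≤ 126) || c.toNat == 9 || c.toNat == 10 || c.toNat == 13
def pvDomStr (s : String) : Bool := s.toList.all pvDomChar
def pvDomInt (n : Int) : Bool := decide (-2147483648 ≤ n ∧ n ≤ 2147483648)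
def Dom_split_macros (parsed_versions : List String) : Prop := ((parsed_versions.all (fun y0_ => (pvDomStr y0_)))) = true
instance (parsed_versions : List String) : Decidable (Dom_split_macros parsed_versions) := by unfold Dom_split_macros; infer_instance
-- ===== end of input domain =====

-- B replaces A's stateful accumulator loop (in_macro flag, growing string, final flush)
-- by a two-step decomposition: collect boundary-line indices, then join the slice between
-- consecutive boundaries (objective: simpler).

-- shared by both ports: the Python condition
-- line.startswith("class vn") and not line.startswith("class vnXX_txxx")
def pvIsBoundary (line : String) : Bool :=
  PySem.Str.startswith line "class vn" && !(PySem.Str.startswith line "class vnXX_txxx")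

-- ===== PORT A =====
def splitStep (st : List String × String × Bool) (line : String) : List String × String × Bool :=
  -- if line is a boundary: flush the current macro (if nonempty), set in_macro, reset macro
  let st := if pvIsBoundary line then
      ((if st.2.1 ≠ "" then st.1 ++ [st.2.1] else st.1), "", true)
    else st
  -- if in_macro: macro += line
  if st.2.2 then (st.1, st.2.1 ++ line, st.2.2) else st

def split_macros (parsed_versions : List String) : List String :=
  let st := parsed_versions.foldl splitStep ([], "", false)
  -- make sure to record final macro
  if st.2.1 ≠ "" then st.1 ++ [st.2.1] else st.1

-- ===== PORT B =====
def split_macros_alt (parsed_versions : List String) : List String :=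
  let boundaries : List Int :=
    ((PySem.List.enumerate parsed_versions).filter (fun p => pvIsBoundary p.2)).map (fun p => p.1)
  let ends : List Int := PySem.List.slice boundaries (some 1) none ++ [(parsed_versions.length : Int)]
  (boundaries.zip ends).map (fun p =>
    PySem.Str.join "" (PySem.List.slice parsed_versions (some p.1) (some p.2)))

-- ===== PRECONDITION & SPEC =====
def Spec_split_macros (parsed_versions : List String) (out : List String) : Prop := out = split_macros_alt parsed_versions
instance (parsed_versions : List String) (out : List String) : Decidable (Spec_split_macros parsed_versions out) := by unfold Spec_split_macros; infer_instance

-- ===== CLAIM (what is proved, stated in full; the proofs are below) =====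
def Claim_equal_split_macros : Prop := ∀ (parsed_versions : List String), Dom_split_macros parsed_versions → Spec_split_macros parsed_versions (split_macros parsed_versions)

-- ===== LEMMAS AND PROOFS =====

-- recursive characterisation of the result, shared target of both ports
def segsGo (acc : String) : List String → List String
  | [] => [acc]
  | x :: xs => if pvIsBoundary x then acc :: segsGo x xs else segsGo (acc ++ x) xs

def segs : List String → List String
  | [] => []
  | x :: xs => if pvIsBoundary x then segsGo x xs else segs xs

-- the text before the first boundary line
def pvPre (xs : List String) : String :=
  PySem.Str.join "" (xs.takeWhile (fun x => !pvIsBoundary x))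

def boundsFrom (s : Int) (xs : List String) : List Int :=
  ((PySem.List.enumerate xs s).filter (fun p => pvIsBoundary p.2)).map (fun p => p.1)

def pvFin (st : List String × String × Bool) : List String :=
  if st.2.1 ≠ "" then st.1 ++ [st.2.1] else st.1

lemma join_empty_cons (x : String) (xs : List String) :
    PySem.Str.join "" (x :: xs) = x ++ PySem.Str.join "" xs := by
  apply String.toList_inj.mp
  cases xs <;>
    simp [PySem.Str.toList_join, PySem.Chars.join_cons_cons, PySem.Chars.join_singleton,
      PySem.Chars.join_nil]

lemma boundary_ne_empty {x : String} (h : pvIsBoundary x = true) : x ≠ "" := by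
  intro hx; subst hx
  revert h
  simp [pvIsBoundary]
  decide

lemma append_ne_empty {m : String} (x : String) (h : m ≠ "") : m ++ x ≠ "" := by
  intro hc
  apply h
  have := congrArg String.toList hc
  simp at this
  exact this.1

lemma boundsFrom_cons (s : Int) (x : String) (xs : List String) :
    boundsFrom s (x :: xs)
      = (if pvIsBoundary x then [s] else []) ++ boundsFrom (s + 1) xs := by
  by_cases hx : pvIsBoundary x <;>
    simp [boundsFrom, PySem.List.enumerate_cons, hx]

lemma boundsFrom_shift (xs : List String) (s : Int) :
    boundsFrom (s + 1) xs = (boundsFrom s xs).map (· + 1) := by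
  induction xs generalizing s with
  | nil => simp [boundsFrom, PySem.List.enumerate_nil]
  | cons x xs ih =>
    rw [boundsFrom_cons, boundsFrom_cons, ih (s + 1)]
    by_cases hx : pvIsBoundary x <;> simp [hx]

lemma boundsFrom_le {s i : Int} {xs : List String} (h : i ∈ boundsFrom s xs) : s ≤ i := by
  unfold boundsFrom at h
  rw [List.mem_map] at h
  obtain ⟨p, hp, rfl⟩ := h
  rw [List.mem_filter] at hp
  obtain ⟨k, _, rfl⟩ := (PySem.List.mem_enumerate_iff _ _ _).mp hp.1
  simp

lemma takeWhile_of_boundsFrom_nil {s : Int} {xs : List String}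
    (h : boundsFrom s xs = []) : xs.takeWhile (fun x => !pvIsBoundary x) = xs := by
  induction xs generalizing s with
  | nil => simp
  | cons x xs ih =>
    rw [boundsFrom_cons] at h
    by_cases hx : pvIsBoundary x
    · simp [hx] at h
    · rw [if_neg (by simp [hx]), List.nil_append] at h
      rw [List.takeWhile_cons_of_pos (by simp [hx]), ih h]

lemma takeWhile_of_boundsFrom_cons {s i : Int} {b' : List Int} {xs : List String}
    (h : boundsFrom s xs = i :: b') :
    s ≤ i ∧ xs.takeWhile (fun x => !pvIsBoundary x) = xs.take (i - s).toNat := by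
  induction xs generalizing s i b' with
  | nil => simp [boundsFrom, PySem.List.enumerate_nil] at h
  | cons x xs ih =>
    rw [boundsFrom_cons] at h
    by_cases hx : pvIsBoundary x
    · simp [hx] at h
      obtain ⟨rfl, _⟩ := h
      simp [hx]
    · simp [hx] at h
      obtain ⟨hle, htw⟩ := ih h
      have h1 : (i - s).toNat = (i - (s + 1)).toNat + 1 := by omega
      simp [hx, htw, h1]
      omega

lemma slice_shift {a b : Int} (x : String) (xs : List String) (ha : 0 ≤ a) (hb : 0 ≤ b) :
    PySem.List.slice (x :: xs) (some (a + 1)) (some (b + 1))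
      = PySem.List.slice xs (some a) (some b) := by
  rw [PySem.List.slice_toNat _ (by omega) (by omega),
      PySem.List.slice_toNat _ ha hb]
  have h1 : (a + 1).toNat = a.toNat + 1 := by omega
  have h2 : (b + 1).toNat = b.toNat + 1 := by omega
  simp [h1, h2]

lemma map_zip_shift (x : String) (xs : List String) (l1 l2 : List Int)
    (h1 : ∀ i ∈ l1, 0 ≤ i) (h2 : ∀ i ∈ l2, 0 ≤ i) :
    ((l1.map (· + 1)).zip (l2.map (· + 1))).map
        (fun p => PySem.Str.join "" (PySem.List.slice (x :: xs) (some p.1) (some p.2)))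
      = (l1.zip l2).map
        (fun p => PySem.Str.join "" (PySem.List.slice xs (some p.1) (some p.2))) := by
  rw [List.zip_map, List.map_map]
  apply List.map_congr_left
  rintro ⟨a, b⟩ hp
  obtain ⟨hp1, hp2⟩ := List.of_mem_zip hp
  simp only [Function.comp_apply, Prod.map_apply]
  rw [slice_shift x xs (h1 _ hp1) (h2 _ hp2)]

lemma join_empty_nil : PySem.Str.join "" ([] : List String) = "" := by
  apply String.toList_inj.mp
  simp [PySem.Str.toList_join, PySem.Chars.join_nil]

lemma alt_nil : split_macros_alt [] = [] := by
  simp [split_macros_alt, PySem.List.enumerate_nil]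

-- B's port, restated through boundsFrom
lemma alt_eq (xs : List String) :
    split_macros_alt xs
      = ((boundsFrom 0 xs).zip ((boundsFrom 0 xs).tail ++ [(xs.length : Int)])).map
          (fun p => PySem.Str.join "" (PySem.List.slice xs (some p.1) (some p.2))) := by
  simp [split_macros_alt, boundsFrom, PySem.List.slice_from_one]

lemma alt_cons_not {x : String} (xs : List String) (h : pvIsBoundary x = false) :
    split_macros_alt (x :: xs) = split_macros_alt xs := by
  rw [alt_eq, alt_eq, boundsFrom_cons, boundsFrom_shift]
  have hn : (((x :: xs).length : Nat) : Int) = (xs.length : Int) + 1 := by simp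
  rw [hn]
  simp only [h, Bool.false_eq_true, if_false, List.nil_append]
  have hkey : ((boundsFrom 0 xs).map (· + 1)).tail ++ [(xs.length : Int) + 1]
      = ((boundsFrom 0 xs).tail ++ [(xs.length : Int)]).map (· + 1) := by
    simp [← List.map_tail]
  rw [hkey]
  apply map_zip_shift
  · intro i hi; exact boundsFrom_le hi
  · intro i hi
    rcases List.mem_append.mp hi with hi | hi
    · exact boundsFrom_le (List.mem_of_mem_tail hi)
    · simp at hi; omega

lemma alt_cons_boundary {x : String} (xs : List String) (h : pvIsBoundary x = true) :
    split_macros_alt (x :: xs) = (x ++ pvPre xs) :: split_macros_alt xs := by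
  have h0 : boundsFrom 0 (x :: xs) = 0 :: (boundsFrom 0 xs).map (· + 1) := by
    rw [boundsFrom_cons, boundsFrom_shift]
    simp [h]
  have hn : (((x :: xs).length : Nat) : Int) = (xs.length : Int) + 1 := by simp
  rw [alt_eq, alt_eq, h0, hn]
  cases hb : boundsFrom 0 xs with
  | nil =>
    have htw := takeWhile_of_boundsFrom_nil hb
    have hslice : PySem.List.slice (x :: xs) (some 0) (some ((xs.length : Int) + 1))
        = x :: xs := by
      rw [PySem.List.slice_toNat _ (by omega) (by omega)]
      have h1 : ((xs.length : Int) + 1).toNat = xs.length + 1 := by omega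
      simp [h1]
    simp only [List.map_nil, List.tail_cons, List.nil_append, List.zip_cons_cons,
      List.zip_nil_left, List.zip_nil_right, List.map_cons, List.map_nil]
    rw [hslice, join_empty_cons, pvPre, htw]
  | cons i b' =>
    obtain ⟨hi, htw⟩ := takeWhile_of_boundsFrom_cons hb
    have hi0 : (0 : Int) ≤ i := hi
    have hhead : PySem.List.slice (x :: xs) (some 0) (some (i + 1))
        = x :: xs.take i.toNat := by
      rw [PySem.List.slice_toNat _ (by omega) (by omega)]
      have h1 : (i + 1).toNat = i.toNat + 1 := by omega
      simp [h1]
    have hpre : x ++ PySem.Str.join "" (xs.take i.toNat) = x ++ pvPre xs := by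
      rw [pvPre, htw]
      simp
    have htail : (((i + 1) :: b'.map (· + 1)).zip (b'.map (· + 1) ++ [(xs.length : Int) + 1])).map
          (fun p => PySem.Str.join "" (PySem.List.slice (x :: xs) (some p.1) (some p.2)))
        = ((i :: b').zip (b' ++ [(xs.length : Int)])).map
          (fun p => PySem.Str.join "" (PySem.List.slice xs (some p.1) (some p.2))) := by
      have e1 : (i + 1) :: b'.map (· + 1) = (i :: b').map (· + 1) := by simp
      have e2 : b'.map (· + 1) ++ [(xs.length : Int) + 1] = (b' ++ [(xs.length : Int)]).map (· + 1) := by simp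
      rw [e1, e2]
      apply map_zip_shift
      · intro j hj; exact boundsFrom_le (hb ▸ hj)
      · intro j hj
        rcases List.mem_append.mp hj with hj | hj
        · have : j ∈ boundsFrom 0 xs := by rw [hb]; exact List.mem_cons_of_mem _ hj
          exact boundsFrom_le this
        · simp at hj; omega
    simp only [List.map_cons, List.tail_cons, List.cons_append, List.zip_cons_cons, List.map_cons]
    rw [hhead, join_empty_cons, hpre, htail]

lemma segsGo_eq (xs : List String) : ∀ acc : String,
    segsGo acc xs = (acc ++ pvPre xs) :: split_macros_alt xs := by
  induction xs with
  | nil =>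
    intro acc
    simp [segsGo, pvPre, join_empty_nil, alt_nil]
  | cons x xs ih =>
    intro acc
    by_cases hx : pvIsBoundary x
    · have hpre : pvPre (x :: xs) = "" := by
        rw [pvPre, List.takeWhile_cons_of_neg (by simp [hx]), join_empty_nil]
      rw [show segsGo acc (x :: xs) = acc :: segsGo x xs from by simp [segsGo, hx]]
      rw [ih x, alt_cons_boundary xs hx, hpre, String.append_empty]
    · have hpre : pvPre (x :: xs) = x ++ pvPre xs := by
        rw [pvPre, List.takeWhile_cons_of_pos (by simp [hx]), join_empty_cons, pvPre]
      rw [show segsGo acc (x :: xs) = segsGo (acc ++ x) xs from by simp [segsGo, hx]]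
      rw [ih (acc ++ x), alt_cons_not xs (by simp [hx]), hpre, String.append_assoc]

lemma segs_eq (xs : List String) : segs xs = split_macros_alt xs := by
  induction xs with
  | nil => simp [segs, alt_nil]
  | cons x xs ih =>
    by_cases hx : pvIsBoundary x
    · rw [show segs (x :: xs) = segsGo x xs from by simp [segs, hx]]
      rw [segsGo_eq xs x, alt_cons_boundary xs hx]
    · rw [show segs (x :: xs) = segs xs from by simp [segs, hx]]
      rw [ih, alt_cons_not xs (by simp [hx])]

lemma foldl_true (xs : List String) : ∀ (ms : List String) (m : String), m ≠ "" →
    pvFin (xs.foldl splitStep (ms, m, true)) = ms ++ segsGo m xs := by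
  induction xs with
  | nil =>
    intro ms m hm
    simp [pvFin, segsGo, hm]
  | cons x xs ih =>
    intro ms m hm
    by_cases hx : pvIsBoundary x
    · have hstep : splitStep (ms, m, true) x = (ms ++ [m], x, true) := by
        simp [splitStep, hx, hm, String.empty_append]
      rw [List.foldl_cons, hstep, ih (ms ++ [m]) x (boundary_ne_empty hx)]
      simp [segsGo, hx]
    · have hstep : splitStep (ms, m, true) x = (ms, m ++ x, true) := by
        simp [splitStep, hx]
      rw [List.foldl_cons, hstep, ih ms (m ++ x) (append_ne_empty x hm)]
      simp [segsGo, hx]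

lemma foldl_false (xs : List String) : ∀ ms : List String,
    pvFin (xs.foldl splitStep (ms, "", false)) = ms ++ segs xs := by
  induction xs with
  | nil =>
    intro ms
    simp [pvFin, segs]
  | cons x xs ih =>
    intro ms
    by_cases hx : pvIsBoundary x
    · have hstep : splitStep (ms, "", false) x = (ms, x, true) := by
        simp [splitStep, hx, String.empty_append]
      rw [List.foldl_cons, hstep, foldl_true xs ms x (boundary_ne_empty hx)]
      simp [segs, hx]
    · have hstep : splitStep (ms, "", false) x = (ms, "", false) := by
        simp [splitStep, hx]
      rw [List.foldl_cons, hstep, ih ms]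
      simp [segs, hx]

-- ===== VERDICT (by name: the statement is the Claim_ definition above) =====
theorem split_macros_spec : Claim_equal_split_macros := by
  intro xs _
  show split_macros xs = split_macros_alt xs
  have h := foldl_false xs []
  simpa [split_macros, pvFin, segs_eq] using h
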